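-- pv_equiv track=rewrite | github.com/cmb1705/LITRIS | src/analysis/gap_detection.py | _coverage_for_tokens
-- ===== SOURCE A (Python) =====
-- def _coverage_for_tokens(tokens: list[str], token_index: dict[str, set[str]]) -> int:
--     coverage_set: set[str] | None = None
--     for token in tokens:
--         candidates = token_index.get(token, set())
--         if coverage_set is None:
--             coverage_set = set(candidates)
--         else:
--             coverage_set &= candidates
--         if not coverage_set:
--             return 0
--     return len(coverage_set or [])
-- ===== SOURCE B (Python) =====
-- def _coverage_for_tokens(tokens: list[str], token_index: dict[str, set[str]]) -> int:
--     if not tokens: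
--         return 0
--     first = token_index.get(tokens[0], set())
--     rest = tokens[1:]
--     return sum(1 for x in first if all(x in token_index.get(t, set()) for t in rest))
-- ===== Notes on version B (the rewrite author's own statement) =====
-- stated objective: simpler
-- what changed: Replaces A's mutable running-intersection set with its None sentinel and early return by a single counting pass: each element of the first token's posting set is counted iff it belongs to every remaining token's posting set.
import Mathlib
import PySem

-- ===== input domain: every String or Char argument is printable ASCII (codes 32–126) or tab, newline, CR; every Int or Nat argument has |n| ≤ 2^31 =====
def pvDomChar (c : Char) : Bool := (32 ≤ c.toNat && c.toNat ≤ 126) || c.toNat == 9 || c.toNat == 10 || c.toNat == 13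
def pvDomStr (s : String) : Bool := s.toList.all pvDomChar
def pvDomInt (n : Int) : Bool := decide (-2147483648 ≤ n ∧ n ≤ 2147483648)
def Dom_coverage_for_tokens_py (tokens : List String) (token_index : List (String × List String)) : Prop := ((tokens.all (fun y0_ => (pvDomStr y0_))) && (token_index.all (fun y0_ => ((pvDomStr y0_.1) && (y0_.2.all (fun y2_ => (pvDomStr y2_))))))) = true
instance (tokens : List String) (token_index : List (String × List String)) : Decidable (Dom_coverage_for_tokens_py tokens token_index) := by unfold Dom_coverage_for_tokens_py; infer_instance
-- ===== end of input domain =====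

-- B replaces A's mutable running-intersection set (None sentinel, early return) by a single
-- counting pass over the first token's posting set; different decomposition, not claimed faster.


-- ===== PORT A =====
-- the loop 'for token in tokens:' with state coverage_set : set[str] | None, early return 0
def covLoopA (token_index : List (String × List String)) : List String → Option (PySem.Set String) → Int
  | [], cov => ((cov.getD []).length : Int)          -- len(coverage_set or [])
  | t :: rest, cov =>
    let candidates := ((PySem.Dict.mk token_index).get? t).getD []   -- token_index.get(token, set())
    let cov' : PySem.Set String :=
      match cov with
      | none => PySem.Set.ofList candidates          -- coverage_set = set(candidates)
      | some s => PySem.Set.inter s candidates       -- coverage_set &= candidates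
    if cov'.isEmpty then 0 else covLoopA token_index rest (some cov')

def coverage_for_tokens_py (tokens : List String) (token_index : List (String × List String)) : Int :=
  covLoopA token_index tokens none

-- ===== PORT B =====
def coverage_for_tokens_py_alt (tokens : List String) (token_index : List (String × List String)) : Int :=
  match tokens with
  | [] => 0                                          -- if not tokens: return 0
  | t :: rest =>
    let first := ((PySem.Dict.mk token_index).get? t).getD []   -- token_index.get(tokens[0], set())
    -- sum(1 for x in first if all(x in token_index.get(t, set()) for t in rest))
    (first.map (fun x =>
      if rest.all (fun u => (((PySem.Dict.mk token_index).get? u).getD []).contains x)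
      then (1 : Int) else 0)).sum

-- ===== PRECONDITION & SPEC =====
-- Pre_ only excludes Lean encodings in which a dict value list has duplicates: the Python dict's
-- values are sets, whose List encoding holds the distinct elements, so such inputs encode no
-- Python input (the Python A returns on every genuine input; nothing A returns on is excluded).
def Pre_coverage_for_tokens_py (tokens : List String) (token_index : List (String × List String)) : Prop :=
  ∀ p ∈ token_index, p.2.Nodup
instance (tokens : List String) (token_index : List (String × List String)) : Decidable (Pre_coverage_for_tokens_py tokens token_index) := by unfold Pre_coverage_for_tokens_py; infer_instance
def pvWitness_coverage_for_tokens_py : List String × (List (String × List String)) :=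
  (["a", "b"], [("a", ["x", "y"]), ("b", ["y", "z"])])
def Spec_coverage_for_tokens_py (tokens : List String) (token_index : List (String × List String)) (out : Int) : Prop := out = coverage_for_tokens_py_alt tokens token_index
instance (tokens : List String) (token_index : List (String × List String)) (out : Int) : Decidable (Spec_coverage_for_tokens_py tokens token_index out) := by unfold Spec_coverage_for_tokens_py; infer_instance

-- ===== CLAIM (what is proved, stated in full; the proofs are below) =====
def Claim_equal_coverage_for_tokens_py : Prop := ∀ (tokens : List String) (token_index : List (String × List String)), Dom_coverage_for_tokens_py tokens token_index → Pre_coverage_for_tokens_py tokens token_index → Spec_coverage_for_tokens_py tokens token_index (coverage_for_tokens_py tokens token_index)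

-- ===== LEMMAS AND PROOFS =====

-- a looked-up dict value is one of the stored value lists, hence Nodup under Pre_
theorem getD_nodup (token_index : List (String × List String)) (t : String)
    (h : ∀ p ∈ token_index, p.2.Nodup) :
    (((PySem.Dict.mk token_index).get? t).getD []).Nodup := by
  induction token_index with
  | nil => simp [PySem.Dict.get?]
  | cons p rest ih =>
    rw [PySem.Dict.get?_mk_cons]
    by_cases hk : p.1 == t
    · simp [hk]; exact h p (by simp)
    · simp [hk]; exact ih (fun q hq => h q (by simp [hq]))

-- A's loop, once the coverage set exists, computes the filtered length (early return included:
-- an empty intersection makes every later filter empty as well)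
theorem covLoopA_char (token_index : List (String × List String)) :
    ∀ (ts : List String) (cov : List String),
      covLoopA token_index ts (some cov) =
        ((cov.filter (fun x =>
          ts.all (fun u => (((PySem.Dict.mk token_index).get? u).getD []).contains x))).length : Int) := by
  intro ts
  induction ts with
  | nil => intro cov; simp [covLoopA]
  | cons t rest ih =>
    intro cov
    have hff : cov.filter (fun x =>
        (t :: rest).all (fun u => (((PySem.Dict.mk token_index).get? u).getD []).contains x)) =
        (PySem.Set.inter cov (((PySem.Dict.mk token_index).get? t).getD [])).filter (fun x =>
          rest.all (fun u => (((PySem.Dict.mk token_index).get? u).getD []).contains x)) := by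
      show _ = (cov.filter _).filter _
      rw [List.filter_filter]
      apply List.filter_congr
      intro a _
      simp [List.all_cons, Bool.and_comm]
    by_cases h : (PySem.Set.inter cov (((PySem.Dict.mk token_index).get? t).getD [])).isEmpty
    · rw [List.isEmpty_iff] at h
      simp only [covLoopA, h]
      rw [hff, h]
      simp
    · simp only [covLoopA]
      rw [if_neg h, ih, hff]

theorem coverage_for_tokens_py_eq (tokens : List String) (token_index : List (String × List String))
    (hpre : Pre_coverage_for_tokens_py tokens token_index) :
    coverage_for_tokens_py tokens token_index = coverage_for_tokens_py_alt tokens token_index := by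
  cases tokens with
  | nil => rfl
  | cons t rest =>
    have hnd : (((PySem.Dict.mk token_index).get? t).getD []).Nodup := getD_nodup _ _ hpre
    have hB : coverage_for_tokens_py_alt (t :: rest) token_index =
        (((((PySem.Dict.mk token_index).get? t).getD []).filter (fun x =>
          rest.all (fun u => (((PySem.Dict.mk token_index).get? u).getD []).contains x))).length : Int) := by
      show ((((PySem.Dict.mk token_index).get? t).getD []).map (fun x =>
        if rest.all (fun u => (((PySem.Dict.mk token_index).get? u).getD []).contains x)
        then (1:Int) else 0)).sum = _
      rw [PySem.List.sum_map_ite_one_zero, List.countP_eq_length_filter]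
    rw [hB]
    show (if (PySem.Set.ofList (((PySem.Dict.mk token_index).get? t).getD [])).isEmpty then 0
          else covLoopA token_index rest
            (some (PySem.Set.ofList (((PySem.Dict.mk token_index).get? t).getD [])))) = _
    rw [PySem.Set.ofList_eq_self_of_nodup _ hnd]
    by_cases h : (((PySem.Dict.mk token_index).get? t).getD []) = []
    · rw [h]
      simp
    · rw [if_neg (by simpa [List.isEmpty_iff] using h), covLoopA_char]

-- ===== VERDICT (by name: the statement is the Claim_ definition above) =====
theorem coverage_for_tokens_py_spec : Claim_equal_coverage_for_tokens_py := by
  intro tokens token_index _ hpre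
  exact coverage_for_tokens_py_eq tokens token_index hpre
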